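-- pv_equiv track=rewrite | github.com/ontodev/gadget | gadget/extract.py | get_hierarchy_capped
-- ===== SOURCE A (Python) =====
-- def get_hierarchy_capped(
--     full_hierarchy: dict,
--     top_terms: set,
--     term_id: str,
--     capped_hierarchy: set = None,
-- ) -> set:
--     """Get a set of all ancestors, in order, up to the top terms. If a lineage does not contain a
--     top term, it will go all the way to the top ancestor (no asserted parent).
--
--     :param full_hierarchy: dict of child -> list of parents
--     :param top_terms: set of terms to stop lineage at
--     :param term_id: term to get ancestor hierarchy of (recursive)
--     :param capped_hierarchy: set to add ancestors to
--     :return set of ancestors up to top term (or top ancestor)"""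
--     if not capped_hierarchy:
--         capped_hierarchy = set()
--     parents = full_hierarchy.get(term_id, [])
--     for p in parents:
--         if p == "owl:Thing":
--             continue
--         elif top_terms and p in top_terms:
--             capped_hierarchy.add(p)
--             continue
--         else:
--             # parent is not a top_term, add it to our set and go to next level
--             capped_hierarchy.add(p)
--             capped_hierarchy.update(
--                 get_hierarchy_capped(
--                     full_hierarchy, top_terms, p, capped_hierarchy=capped_hierarchy,
--                 )
--             )
--     return capped_hierarchy
-- ===== SOURCE B (Python) =====
-- def get_hierarchy_capped(
--     full_hierarchy: dict,
--     top_terms: set,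
--     term_id: str,
--     capped_hierarchy: set = None,
-- ) -> set:
--     """Iterative DFS over an explicit frame stack with a visited set: each term is
--     expanded at most once.  Returns a fresh set (does not mutate the caller's set)."""
--     result = set(capped_hierarchy) if capped_hierarchy else set()
--     visited = {term_id}
--     # each frame holds the still-unprocessed parents of one term, stored reversed
--     # so that pop() yields them in the original order
--     stack = [full_hierarchy.get(term_id, [])[::-1]]
--     while stack:
--         frame = stack[-1]
--         if not frame:
--             stack.pop()
--             continue
--         p = frame.pop()
--         if p == "owl:Thing":
--             continue
--         result.add(p)
--         if top_terms and p in top_terms: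
--             continue
--         if p not in visited:
--             visited.add(p)
--             stack.append(full_hierarchy.get(p, [])[::-1])
--     return result
-- ===== Notes on version B (the rewrite author's own statement) =====
-- stated objective: alternative
-- what changed: B replaces A's unguarded mutual recursion (which re-expands an already-collected term every time it is reached again) by an iterative DFS over an explicit frame stack with a visited set, expanding each term at most once, and returns a fresh set instead of mutating the caller's set.
import Mathlib
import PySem

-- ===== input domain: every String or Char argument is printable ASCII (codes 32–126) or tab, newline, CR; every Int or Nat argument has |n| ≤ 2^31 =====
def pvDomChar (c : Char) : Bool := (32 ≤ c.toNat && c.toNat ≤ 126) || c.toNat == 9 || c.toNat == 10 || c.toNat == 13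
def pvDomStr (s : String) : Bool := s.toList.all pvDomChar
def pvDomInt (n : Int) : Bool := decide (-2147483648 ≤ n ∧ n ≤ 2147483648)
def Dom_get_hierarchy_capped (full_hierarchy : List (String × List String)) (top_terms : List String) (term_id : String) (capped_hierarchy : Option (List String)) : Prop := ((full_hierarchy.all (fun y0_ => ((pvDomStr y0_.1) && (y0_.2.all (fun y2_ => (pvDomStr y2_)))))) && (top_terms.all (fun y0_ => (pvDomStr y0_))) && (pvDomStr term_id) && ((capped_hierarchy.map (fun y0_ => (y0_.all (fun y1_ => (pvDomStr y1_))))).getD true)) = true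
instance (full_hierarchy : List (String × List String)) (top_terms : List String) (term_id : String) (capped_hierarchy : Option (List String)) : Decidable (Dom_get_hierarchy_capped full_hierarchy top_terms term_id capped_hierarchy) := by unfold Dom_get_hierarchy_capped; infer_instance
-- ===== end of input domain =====

-- One line: B replaces A's unguarded mutual recursion by an iterative DFS over an explicit frame
-- stack with a visited set (each term expanded at most once); equivalence is about the RETURN
-- value only — Python A mutates the passed-in set, B does not.

-- ===== PORT A =====
-- full_hierarchy.get(term_id, []) — first-match lookup on the association list
def pvParents (fh : List (String × List String)) (t : String) : List String :=
  (PySem.Dict.mk fh).getD t []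

mutual
-- recursive body of A; the fuel argument only makes the graph recursion structural: under
-- Pre_ (acyclic hierarchy) the fuel fh.length+1 is never exhausted (pvSim below)
def ghcA (fh : List (String × List String)) (top : List String) :
    Nat → String → PySem.Set String → PySem.Set String
  | 0, _, acc => acc
  | f+1, tid, acc => ghcALoop fh top f (pvParents fh tid) acc
  termination_by f _ _ => (f, 0)
-- the 'for p in parents' loop of A
def ghcALoop (fh : List (String × List String)) (top : List String) :
    Nat → List String → PySem.Set String → PySem.Set String
  | _, [], acc => acc
  | f, p :: ps, acc =>
    if p = "owl:Thing" then ghcALoop fh top f ps acc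
    else if top ≠ [] ∧ p ∈ top then ghcALoop fh top f ps (PySem.Set.add acc p)
    else
      -- capped.add(p); capped.update(recursive call on the same (mutated) set):
      -- the recursive call returns the very set being updated, so the update folds r into r
      let r := ghcA fh top f p (PySem.Set.add acc p)
      ghcALoop fh top f ps (PySem.Set.update r r)
  termination_by f l _ => (f, l.length + 1)
end

def get_hierarchy_capped (full_hierarchy : List (String × List String)) (top_terms : List String) (term_id : String) (capped_hierarchy : Option (List String)) : List String :=
  -- 'if not capped_hierarchy: capped_hierarchy = set()' (None and the empty set are falsy)
  let init : PySem.Set String :=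
    match capped_hierarchy with
    | none => PySem.Set.empty
    | some l => if l = [] then PySem.Set.empty else PySem.Set.ofList l
  ghcA full_hierarchy top_terms (full_hierarchy.length + 1) term_id init

-- ===== PORT B =====
-- termination bookkeeping for the while loop (used only in decreasing_by):
-- pvW bounds every frame's length, pvUniv contains every term the visited set can gain
def pvW (fh : List (String × List String)) : Nat := (fh.map (fun kv => kv.2.length)).foldr max 0
def pvUniv (fh : List (String × List String)) : Finset String := (fh.map Prod.fst ++ fh.flatMap Prod.snd).toFinset

lemma pvParents_len_le (fh : List (String × List String)) (t : String) :
    (pvParents fh t).length ≤ pvW fh := by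
  induction fh with
  | nil => simp [pvParents, PySem.Dict.getD, PySem.Dict.get?, pvW]
  | cons kv rest ih =>
    simp only [pvParents, PySem.Dict.getD] at ih ⊢
    rw [PySem.Dict.get?_mk_cons]
    by_cases he : kv.1 == t
    · simp only [he, if_true, Option.getD_some, pvW, List.map_cons, List.foldr_cons]
      exact Nat.le_max_left _ _
    · simp only [he, Bool.false_eq_true, if_false]
      calc _ ≤ pvW rest := ih
        _ ≤ _ := by simp only [pvW, List.map_cons, List.foldr_cons]; exact Nat.le_max_right _ _

lemma pvParents_nil_of_not_univ {fh : List (String × List String)} {t : String}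
    (h : t ∉ pvUniv fh) : pvParents fh t = [] := by
  induction fh with
  | nil => simp [pvParents, PySem.Dict.getD, PySem.Dict.get?]
  | cons kv rest ih =>
    simp only [pvUniv, List.mem_toFinset, List.map_cons, List.flatMap_cons, List.cons_append,
      List.mem_cons, List.mem_append] at h ih
    simp only [pvParents, PySem.Dict.getD] at ih ⊢
    rw [PySem.Dict.get?_mk_cons]
    by_cases he : kv.1 == t
    · exact absurd (beq_iff_eq.mp he).symm (by tauto)
    · simp only [he, Bool.false_eq_true, if_false]
      exact ih (by tauto)

lemma pvCardLe {fh : List (String × List String)} {vis : PySem.Set String} {p : String} :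
    (pvUniv fh \ (PySem.Set.add vis p).toFinset).card ≤ (pvUniv fh \ vis.toFinset).card := by
  apply Finset.card_le_card
  intro x hx
  rw [Finset.mem_sdiff] at hx ⊢
  refine ⟨hx.1, fun hm => hx.2 ?_⟩
  rw [List.mem_toFinset] at hm ⊢
  rw [PySem.Set.mem_add]
  exact Or.inl hm

lemma pvCardDrop {fh : List (String × List String)} {vis : PySem.Set String} {p : String}
    (hp : p ∈ pvUniv fh) (hnp : p ∉ vis) :
    (pvUniv fh \ (PySem.Set.add vis p).toFinset).card + 1 ≤ (pvUniv fh \ vis.toFinset).card := by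
  apply Nat.succ_le_of_lt
  apply Finset.card_lt_card
  constructor
  · intro x hx
    rw [Finset.mem_sdiff] at hx ⊢
    refine ⟨hx.1, fun hm => hx.2 ?_⟩
    rw [List.mem_toFinset] at hm ⊢
    rw [PySem.Set.mem_add]
    exact Or.inl hm
  · intro hsub
    have hpin : p ∈ pvUniv fh \ vis.toFinset := by
      rw [Finset.mem_sdiff, List.mem_toFinset]; exact ⟨hp, hnp⟩
    have := hsub hpin
    rw [Finset.mem_sdiff, List.mem_toFinset, PySem.Set.mem_add] at this
    exact this.2 (Or.inr rfl)

-- the while loop of B: stack of frames (unprocessed parents of the terms on the DFS path),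
-- visited set, result set; frames processed head-first (python stores them reversed and pops)
def ghcBStep (fh : List (String × List String)) (top : List String) :
    List (List String) → PySem.Set String → PySem.Set String → PySem.Set String
  | [], _, res => res
  | [] :: rest, vis, res => ghcBStep fh top rest vis res
  | (p :: ps) :: rest, vis, res =>
    if p = "owl:Thing" then ghcBStep fh top (ps :: rest) vis res
    else
      let res' := PySem.Set.add res p
      if top ≠ [] ∧ p ∈ top then ghcBStep fh top (ps :: rest) vis res'
      else if p ∈ vis then ghcBStep fh top (ps :: rest) vis res'
      else ghcBStep fh top (pvParents fh p :: ps :: rest) (PySem.Set.add vis p) res'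
  termination_by stack vis _ =>
    (pvUniv fh \ vis.toFinset).card * (2 * pvW fh + 2) + 2 * (stack.map List.length).sum + stack.length
  decreasing_by
  · simp only [List.map_cons, List.sum_cons, List.length_cons]; omega
  · simp only [List.map_cons, List.sum_cons, List.length_cons]; omega
  · simp only [List.map_cons, List.sum_cons, List.length_cons]; omega
  · simp only [List.map_cons, List.sum_cons, List.length_cons]; omega
  · rename_i hv
    simp only [List.map_cons, List.sum_cons, List.length_cons]
    by_cases hp : p ∈ pvUniv fh
    · have h1 : (pvUniv fh \ (PySem.Set.add vis p).toFinset).card + 1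
          ≤ (pvUniv fh \ vis.toFinset).card := pvCardDrop hp hv
      have h2 : (pvParents fh p).length ≤ pvW fh := pvParents_len_le fh p
      have h3 : ((pvUniv fh \ (PySem.Set.add vis p).toFinset).card + 1) * (2 * pvW fh + 2)
          ≤ (pvUniv fh \ vis.toFinset).card * (2 * pvW fh + 2) := Nat.mul_le_mul_right _ h1
      have h4 : ((pvUniv fh \ (PySem.Set.add vis p).toFinset).card + 1) * (2 * pvW fh + 2)
          = (pvUniv fh \ (PySem.Set.add vis p).toFinset).card * (2 * pvW fh + 2)
            + (2 * pvW fh + 2) := by ring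
      omega
    · have h1 : (pvUniv fh \ (PySem.Set.add vis p).toFinset).card
          ≤ (pvUniv fh \ vis.toFinset).card := pvCardLe
      have h2 : pvParents fh p = [] := pvParents_nil_of_not_univ hp
      have h3 : ((pvUniv fh \ (PySem.Set.add vis p).toFinset).card)
          * (2 * pvW fh + 2) ≤ (pvUniv fh \ vis.toFinset).card * (2 * pvW fh + 2) :=
        Nat.mul_le_mul_right _ h1
      simp only [h2, List.length_nil]
      omega

def get_hierarchy_capped_alt (full_hierarchy : List (String × List String)) (top_terms : List String) (term_id : String) (capped_hierarchy : Option (List String)) : List String :=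
  -- result = set(capped_hierarchy) if capped_hierarchy else set()
  let init : PySem.Set String :=
    match capped_hierarchy with
    | none => PySem.Set.empty
    | some l => if l = [] then PySem.Set.empty else PySem.Set.ofList l
  ghcBStep full_hierarchy top_terms [pvParents full_hierarchy term_id]
    (PySem.Set.ofList [term_id]) init

-- ===== PRECONDITION & SPEC =====
-- the parents A actually recurses into: not "owl:Thing" and not a top term
def pvTParents (fh : List (String × List String)) (top : List String) (t : String) : List String :=
  (pvParents fh t).filter (fun p => !(p == "owl:Thing") && !(!top.isEmpty && top.contains p))
-- Pre_ states a graph-shape condition (no traversal-edge cycle reachable from term_id) via the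
-- standard bounded breadth-first closure of the edge relation; this is not the ports' algorithm
-- (A recurses depth-first re-expanding repeated parents, B runs a stack machine).
-- one breadth step of that relation: S together with every traversed parent of a member of S
def pvStep (fh : List (String × List String)) (top : List String) (S : List String) : List String :=
  PySem.Set.update S (S.flatMap (pvTParents fh top))
def pvReach (fh : List (String × List String)) (top : List String) : Nat → List String → List String
  | 0, S => S
  | n+1, S => pvReach fh top n (pvStep fh top S)

-- Pre_ excludes exactly the hierarchies on which A's recursion never ends: a cycle of
-- traversed parent edges (skipping "owl:Thing" and top terms) reachable from term_id —
-- there Python A exceeds the recursion limit (RecursionError).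
def Pre_get_hierarchy_capped (full_hierarchy : List (String × List String)) (top_terms : List String) (term_id : String) (capped_hierarchy : Option (List String)) : Prop :=
  ∀ c ∈ full_hierarchy.map Prod.fst,
    c ∈ pvReach full_hierarchy top_terms (full_hierarchy.length + 1) (PySem.Set.ofList [term_id]) →
    c ∉ pvReach full_hierarchy top_terms full_hierarchy.length
        (PySem.Set.ofList (pvTParents full_hierarchy top_terms c))
instance (full_hierarchy : List (String × List String)) (top_terms : List String) (term_id : String) (capped_hierarchy : Option (List String)) : Decidable (Pre_get_hierarchy_capped full_hierarchy top_terms term_id capped_hierarchy) := by unfold Pre_get_hierarchy_capped; infer_instance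

def pvWitness_get_hierarchy_capped : (List (String × List String)) × List String × String × Option (List String) :=
  ([("a", ["b", "c"]), ("b", ["c"])], ["c"], "a", none)

def Spec_get_hierarchy_capped (full_hierarchy : List (String × List String)) (top_terms : List String) (term_id : String) (capped_hierarchy : Option (List String)) (out : List String) : Prop := out = get_hierarchy_capped_alt full_hierarchy top_terms term_id capped_hierarchy
instance (full_hierarchy : List (String × List String)) (top_terms : List String) (term_id : String) (capped_hierarchy : Option (List String)) (out : List String) : Decidable (Spec_get_hierarchy_capped full_hierarchy top_terms term_id capped_hierarchy out) := by unfold Spec_get_hierarchy_capped; infer_instance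

-- ===== CLAIM (what is proved, stated in full; the proofs are below) =====
def Claim_equal_get_hierarchy_capped : Prop := ∀ (full_hierarchy : List (String × List String)) (top_terms : List String) (term_id : String) (capped_hierarchy : Option (List String)), Dom_get_hierarchy_capped full_hierarchy top_terms term_id capped_hierarchy → Pre_get_hierarchy_capped full_hierarchy top_terms term_id capped_hierarchy → Spec_get_hierarchy_capped full_hierarchy top_terms term_id capped_hierarchy (get_hierarchy_capped full_hierarchy top_terms term_id capped_hierarchy)

-- ===== LEMMAS AND PROOFS =====

-- the traversal-edge relation of the hierarchy: the edges A's recursion follows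
def pvTEdge (fh : List (String × List String)) (top : List String) (a b : String) : Prop :=
  b ∈ pvParents fh a ∧ b ≠ "owl:Thing" ∧ ¬(top ≠ [] ∧ b ∈ top)

-- "d is collected when expanding e": a parent chain e → … → d whose steps avoid "owl:Thing"
-- and pass through non-top intermediates only
inductive pvRT (fh : List (String × List String)) (top : List String) : String → String → Prop
  | base {t p : String} : p ∈ pvParents fh t → p ≠ "owl:Thing" → pvRT fh top t p
  | head {t p d : String} : p ∈ pvParents fh t → p ≠ "owl:Thing" →
      ¬(top ≠ [] ∧ p ∈ top) → pvRT fh top p d → pvRT fh top t d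

-- acc already contains everything expanding e could add
def pvComplete (fh : List (String × List String)) (top : List String)
    (acc : PySem.Set String) (e : String) : Prop :=
  ∀ d, pvRT fh top e d → d ∈ acc

lemma pvMemParentsKeys {fh : List (String × List String)} {t p : String}
    (h : p ∈ pvParents fh t) : t ∈ fh.map Prod.fst := by
  induction fh with
  | nil => simp [pvParents, PySem.Dict.getD, PySem.Dict.get?] at h
  | cons kv rest ih =>
    simp only [pvParents, PySem.Dict.getD] at h ih
    rw [PySem.Dict.get?_mk_cons] at h
    by_cases he : kv.1 == t
    · simp only [List.map_cons, List.mem_cons]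
      exact Or.inl (beq_iff_eq.mp he).symm
    · simp only [he, Bool.false_eq_true, if_false] at h
      simp only [List.map_cons, List.mem_cons]
      exact Or.inr (ih h)

lemma pvNodupLen {l ks : List String} (hn : l.Nodup) (hs : ∀ x ∈ l, x ∈ ks) :
    l.length ≤ ks.length := by
  calc l.length = l.toFinset.card := (List.toFinset_card_of_nodup hn).symm
    _ ≤ ks.toFinset.card := by
        apply Finset.card_le_card
        intro x hx
        simp only [List.mem_toFinset] at hx ⊢
        exact hs x hx
    _ ≤ ks.length := ks.toFinset_card_le

lemma pvSetSubsetAdd {s : PySem.Set String} {x : String} : s ⊆ PySem.Set.add s x := by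
  intro y hy; rw [PySem.Set.mem_add]; exact Or.inl hy

lemma pvUpdateOfMem : ∀ {xs : List String} {s : PySem.Set String}, (∀ x ∈ xs, x ∈ s) →
    PySem.Set.update s xs = s := by
  intro xs
  induction xs with
  | nil => intro s _; rfl
  | cons x xs ih =>
    intro s h
    rw [PySem.Set.update_cons, PySem.Set.add_of_mem (h x (by simp))]
    exact ih fun y hy => h y (by simp [hy])

lemma pvCompleteMono {fh top} {acc acc' : PySem.Set String} {e : String}
    (hs : acc ⊆ acc') (h : pvComplete fh top acc e) : pvComplete fh top acc' e :=
  fun d hd => hs (h d hd)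

-- composing chains: a chain from t to q, q not top, then a chain from q to d
lemma pvRTtrans {fh top} {t q d : String} (h1 : pvRT fh top t q)
    (hq : ¬(top ≠ [] ∧ q ∈ top)) (h2 : pvRT fh top q d) : pvRT fh top t d := by
  induction h1 with
  | base hp ho => exact pvRT.head hp ho hq h2
  | head hp ho hnt _ ih => exact pvRT.head hp ho hnt (ih hq h2)

-- extending a chain by one edge at the end
lemma pvRTextend {fh top} {a b p : String} (h : pvRT fh top a b)
    (hb : ¬(top ≠ [] ∧ b ∈ top)) (hp : p ∈ pvParents fh b) (hpo : p ≠ "owl:Thing") :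
    pvRT fh top a p :=
  pvRTtrans h hb (pvRT.base hp hpo)

lemma pvRT_transGen {fh top} {a b : String} (h : pvRT fh top a b)
    (hb : ¬(top ≠ [] ∧ b ∈ top)) : Relation.TransGen (pvTEdge fh top) a b := by
  induction h with
  | base hp ho => exact Relation.TransGen.single ⟨hp, ho, hb⟩
  | head hp ho hnt _ ih => exact Relation.TransGen.head ⟨hp, ho, hnt⟩ (ih hb)

lemma pvMemTParents {fh top} {a b : String} :
    b ∈ pvTParents fh top a ↔ pvTEdge fh top a b := by
  unfold pvTParents pvTEdge
  simp [List.mem_filter, not_and, List.isEmpty_iff]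
  tauto

-- idempotence: A re-expanding a term whose collection is already complete adds nothing
lemma pvIdem (fh : List (String × List String)) (top : List String) :
    ∀ f tid (acc : PySem.Set String), pvComplete fh top acc tid → ghcA fh top f tid acc = acc := by
  intro f
  induction f with
  | zero => intro tid acc _; simp [ghcA]
  | succ f ih =>
    intro tid acc h
    have inner : ∀ ps, (∀ p ∈ ps, p ∈ pvParents fh tid) →
        ghcALoop fh top f ps acc = acc := by
      intro ps
      induction ps with
      | nil => intro _; simp [ghcALoop]
      | cons p ps ihp =>
        intro hmem
        have hp := hmem p (by simp)
        have hrest := fun q (hq : q ∈ ps) => hmem q (List.mem_cons_of_mem _ hq)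
        by_cases ho : p = "owl:Thing"
        · simp only [ghcALoop, if_pos ho]
          exact ihp hrest
        · by_cases ht : top ≠ [] ∧ p ∈ top
          · have hpacc : p ∈ acc := h p (pvRT.base hp ho)
            simp only [ghcALoop, if_neg ho, if_pos ht, PySem.Set.add_of_mem hpacc]
            exact ihp hrest
          · have hpacc : p ∈ acc := h p (pvRT.base hp ho)
            have hcomp : pvComplete fh top acc p :=
              fun d hd => h d (pvRTtrans (pvRT.base hp ho) ht hd)
            simp only [ghcALoop, if_neg ho, if_neg ht, PySem.Set.add_of_mem hpacc,
              ih p acc hcomp, pvUpdateOfMem (fun x hx => hx)]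
            exact ihp hrest
    simp only [ghcA]
    exact inner _ (fun _ hq => hq)

-- ==== acyclicity: Pre_ implies the edge relation has no cycle ====

def pvEPath (r : String → String → Prop) : String → List String → String → Prop
  | c, [], d => r c d
  | c, x :: xs, d => r c x ∧ pvEPath r x xs d

lemma pvEPathSnoc {r : String → String → Prop} : ∀ {l : List String} {c b e : String},
    pvEPath r c l b → r b e → pvEPath r c (l ++ [b]) e := by
  intro l
  induction l with
  | nil => intro c b e h he; exact ⟨h, he⟩
  | cons x xs ih => intro c b e h he; exact ⟨h.1, ih h.2 he⟩

lemma pvTGtoEPath {r : String → String → Prop} {c d : String} (h : Relation.TransGen r c d) :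
    ∃ l, pvEPath r c l d := by
  induction h with
  | single h => exact ⟨[], h⟩
  | tail _ he ih =>
    obtain ⟨l, hl⟩ := ih
    exact ⟨l ++ [_], pvEPathSnoc hl he⟩

lemma pvEPathSplit {r : String → String → Prop} : ∀ {l1 : List String} {c : String} {x : String} {l2 : List String}
    {d : String}, pvEPath r c (l1 ++ x :: l2) d → pvEPath r c l1 x ∧ pvEPath r x l2 d := by
  intro l1
  induction l1 with
  | nil => intro c x l2 d h; exact ⟨h.1, h.2⟩
  | cons y ys ih =>
    intro c x l2 d h
    obtain ⟨h1, h2⟩ := h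
    exact ⟨⟨h1, (ih h2).1⟩, (ih h2).2⟩

lemma pvEPathJoin {r : String → String → Prop} : ∀ {l1 : List String} {c x : String} {l2 : List String} {d : String},
    pvEPath r c l1 x → pvEPath r x l2 d → pvEPath r c (l1 ++ x :: l2) d := by
  intro l1
  induction l1 with
  | nil => intro c x l2 d h1 h2; exact ⟨h1, h2⟩
  | cons y ys ih => intro c x l2 d h1 h2; exact ⟨h1.1, ih h1.2 h2⟩

lemma pvNotNodup {α : Type} [DecidableEq α] : ∀ {l : List α}, ¬ l.Nodup →
    ∃ (x : α) (l1 l2 l3 : List α), l = l1 ++ x :: l2 ++ x :: l3 := by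
  intro l
  induction l with
  | nil => intro h; exact absurd List.nodup_nil h
  | cons a l ih =>
    intro h
    by_cases ha : a ∈ l
    · obtain ⟨l2, l3, rfl⟩ := List.append_of_mem ha
      exact ⟨a, [], l2, l3, rfl⟩
    · have : ¬ l.Nodup := fun hn => h (List.nodup_cons.mpr ⟨ha, hn⟩)
      obtain ⟨x, l1, l2, l3, rfl⟩ := ih this
      exact ⟨x, a :: l1, l2, l3, rfl⟩

lemma pvEPathShorten {r : String → String → Prop} : ∀ (n : Nat) {l : List String} {c : String}, l.length ≤ n →
    pvEPath r c l c → ∃ l', pvEPath r c l' c ∧ l'.Nodup ∧ c ∉ l' := by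
  intro n
  induction n with
  | zero =>
    intro l c hlen h
    have : l = [] := List.eq_nil_of_length_eq_zero (Nat.le_zero.mp hlen)
    subst this
    exact ⟨[], h, List.nodup_nil, List.not_mem_nil⟩
  | succ n ih =>
    intro l c hlen h
    by_cases hc : c ∈ l
    · obtain ⟨l1, l2, rfl⟩ := List.append_of_mem hc
      have h2 := (pvEPathSplit h).2
      exact ih (by simp at hlen ⊢; omega) h2
    · by_cases hn : l.Nodup
      · exact ⟨l, h, hn, hc⟩
      · obtain ⟨x, l1, l2, l3, rfl⟩ := pvNotNodup hn
        have h' : pvEPath r c (l1 ++ x :: (l2 ++ x :: l3)) c := by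
          simpa using h
        have hsp := pvEPathSplit (l1 := l1) h'
        have hsp2 := pvEPathSplit (l1 := l2) hsp.2
        have hjoin := pvEPathJoin hsp.1 hsp2.2
        refine ih ?_ hjoin
        simp at hlen ⊢
        omega

lemma pvEPathNodup {r : String → String → Prop} : ∀ (n : Nat) {l : List String} {a b : String}, l.length ≤ n →
    pvEPath r a l b → ∃ l', pvEPath r a l' b ∧ l'.Nodup := by
  intro n
  induction n with
  | zero =>
    intro l a b hlen h
    have : l = [] := List.eq_nil_of_length_eq_zero (Nat.le_zero.mp hlen)
    subst this
    exact ⟨[], h, List.nodup_nil⟩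
  | succ n ih =>
    intro l a b hlen h
    by_cases hn : l.Nodup
    · exact ⟨l, h, hn⟩
    · obtain ⟨x, l1, l2, l3, rfl⟩ := pvNotNodup hn
      have h' : pvEPath r a (l1 ++ x :: (l2 ++ x :: l3)) b := by simpa using h
      have hsp := pvEPathSplit (l1 := l1) h'
      have hsp2 := pvEPathSplit (l1 := l2) hsp.2
      have hjoin := pvEPathJoin hsp.1 hsp2.2
      refine ih ?_ hjoin
      simp at hlen ⊢
      omega

lemma pvMemStep {fh top} {S : List String} {y : String} :
    y ∈ pvStep fh top S ↔ y ∈ S ∨ ∃ x ∈ S, y ∈ pvTParents fh top x := by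
  unfold pvStep
  rw [PySem.Set.mem_update, List.mem_flatMap]

lemma pvReachSuccOut {fh top} : ∀ (n : Nat) (S : List String),
    pvReach fh top (n+1) S = pvStep fh top (pvReach fh top n S) := by
  intro n
  induction n with
  | zero => intro S; rfl
  | succ n ih => intro S; show pvReach fh top (n+1) (pvStep fh top S) = _; rw [ih]; rfl

lemma pvReachMono {fh top} {m n : Nat} (h : m ≤ n) (S : List String) :
    pvReach fh top m S ⊆ pvReach fh top n S := by
  induction n with
  | zero => cases Nat.le_zero.mp h; exact fun x hx => hx
  | succ n ih =>
    rcases Nat.lt_or_ge m (n+1) with hlt | hge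
    · intro x hx
      rw [pvReachSuccOut]
      exact pvMemStep.mpr (Or.inl (ih (Nat.lt_succ_iff.mp hlt) hx))
    · cases Nat.le_antisymm h hge; exact fun x hx => hx

lemma pvStepOfEdge {fh top} {n : Nat} {S : List String} {x y : String}
    (hx : x ∈ pvReach fh top n S) (he : pvTEdge fh top x y) : y ∈ pvReach fh top (n+1) S := by
  rw [pvReachSuccOut]
  exact pvMemStep.mpr (Or.inr ⟨x, hx, pvMemTParents.mpr he⟩)

lemma pvEPathReach {fh top} : ∀ {l : List String} {k : Nat} {x d : String} {S : List String},
    x ∈ pvReach fh top k S → pvEPath (pvTEdge fh top) x l d →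
    d ∈ pvReach fh top (k + l.length + 1) S := by
  intro l
  induction l with
  | nil => intro k x d S hx h; exact pvStepOfEdge hx h
  | cons y ys ih =>
    intro k x d S hx h
    have hy : y ∈ pvReach fh top (k+1) S := pvStepOfEdge hx h.1
    have := ih hy h.2
    simpa [Nat.add_assoc, Nat.add_comm, Nat.add_left_comm] using this

lemma pvEPathKeys {fh top} : ∀ {l : List String} {c d : String},
    pvEPath (pvTEdge fh top) c l d → ∀ x ∈ c :: l, x ∈ fh.map Prod.fst := by
  intro l
  induction l with
  | nil =>
    intro c d h x hx
    simp only [List.mem_cons, List.not_mem_nil, or_false] at hx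
    subst hx
    exact pvMemParentsKeys h.1
  | cons y ys ih =>
    intro c d h x hx
    rcases List.mem_cons.mp hx with rfl | hx'
    · exact pvMemParentsKeys h.1.1
    · exact ih h.2 x hx'

lemma pvPreAcyc {fh : List (String × List String)} {top : List String} {tid : String}
    {cap : Option (List String)} (hpre : Pre_get_hierarchy_capped fh top tid cap) :
    ∀ c, (c = tid ∨ Relation.TransGen (pvTEdge fh top) tid c) →
      ¬ Relation.TransGen (pvTEdge fh top) c c := by
  intro c hrch htg
  have hmem : c ∈ pvReach fh top (fh.length + 1) (PySem.Set.ofList [tid]) := by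
    rcases hrch with rfl | hrch
    · exact pvReachMono (Nat.zero_le _) _ ((PySem.Set.mem_ofList _ _).mpr (by simp))
    · obtain ⟨l, hl⟩ := pvTGtoEPath hrch
      obtain ⟨l', hl', hnd⟩ := pvEPathNodup l.length le_rfl hl
      have hkeys := pvEPathKeys hl'
      have hlen : l'.length ≤ fh.length := by
        have := pvNodupLen hnd (fun x hx => hkeys x (List.mem_cons_of_mem _ hx))
        simpa using this
      have htid0 : tid ∈ pvReach fh top 0 (PySem.Set.ofList [tid]) :=
        (PySem.Set.mem_ofList _ _).mpr (by simp)
      have := pvEPathReach htid0 hl'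
      exact pvReachMono (by omega) _ this
  obtain ⟨l, hl⟩ := pvTGtoEPath htg
  obtain ⟨l', hl', hnd, hcl⟩ := pvEPathShorten l.length le_rfl hl
  have hkeys := pvEPathKeys hl'
  have hck : c ∈ fh.map Prod.fst := hkeys c (by simp)
  have hnd' : (c :: l').Nodup := List.nodup_cons.mpr ⟨hcl, hnd⟩
  have hlen : l'.length + 1 ≤ fh.length := by
    have := pvNodupLen hnd' hkeys
    simpa using this
  have hreach : c ∈ pvReach fh top l'.length (PySem.Set.ofList (pvTParents fh top c)) := by
    cases l' with
    | nil => exact (PySem.Set.mem_ofList _ _).mpr (pvMemTParents.mpr hl')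
    | cons y ys =>
      have hy : y ∈ pvReach fh top 0 (PySem.Set.ofList (pvTParents fh top c)) :=
        (PySem.Set.mem_ofList _ _).mpr (pvMemTParents.mpr hl'.1)
      simpa using pvEPathReach hy hl'.2
  exact hpre c hck hmem (pvReachMono (by omega) _ hreach)

-- ==== the simulation: B's stack machine runs A's defunctionalized continuation ====

-- the pending A-computation a stack of frames denotes: the top frame is the loop ghcALoop f s,
-- each deeper frame resumes at one fuel level higher
def pvContA (fh : List (String × List String)) (top : List String) :
    Nat → List (List String) → PySem.Set String → PySem.Set String
  | _, [], acc => acc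
  | f, s :: rest, acc => pvContA fh top (f+1) rest (ghcALoop fh top f s acc)

-- the frame invariant: each frame is a tail of its term's parent list, and every already
-- processed parent (other than "owl:Thing") is in the result (and in vis unless a top term)
def pvFrameInv (fh : List (String × List String)) (top : List String)
    (vis res : PySem.Set String) (s : List String) (t : String) : Prop :=
  ∃ proc, pvParents fh t = proc ++ s ∧
    ∀ p ∈ proc, p ≠ "owl:Thing" → p ∈ res ∧ (¬(top ≠ [] ∧ p ∈ top) → p ∈ vis)

lemma pvFrameInvMono {fh top} {vis vis' res res' : PySem.Set String} {s : List String} {t : String}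
    (hr : res ⊆ res') (hv : vis ⊆ vis') (h : pvFrameInv fh top vis res s t) :
    pvFrameInv fh top vis' res' s t := by
  obtain ⟨proc, heq, hall⟩ := h
  exact ⟨proc, heq, fun p hp ho => ⟨hr (hall p hp ho).1, fun ht => hv ((hall p hp ho).2 ht)⟩⟩

-- a non-skipped parent of the current term cannot lie on the DFS path (else a cycle)
lemma pvParentNotOnPath {fh : List (String × List String)} {top : List String} {root : String}
    (hacyc : ∀ c, (c = root ∨ Relation.TransGen (pvTEdge fh top) root c) →
      ¬ Relation.TransGen (pvTEdge fh top) c c)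
    {t₀ : String} {ts' : List String}
    (hpair : (t₀ :: ts').Pairwise (fun a b => pvRT fh top b a))
    (hdrop : ∀ t ∈ (t₀ :: ts').dropLast, t ≠ "owl:Thing" ∧ ¬(top ≠ [] ∧ t ∈ top))
    (hreach : ∀ t ∈ (t₀ :: ts'), t = root ∨ Relation.TransGen (pvTEdge fh top) root t)
    {q : String} (hq : q ∈ pvParents fh t₀) (hqo : q ≠ "owl:Thing")
    (hqt : ¬(top ≠ [] ∧ q ∈ top)) : q ∉ (t₀ :: ts') := by
  intro hmem
  have hedge : pvTEdge fh top t₀ q := ⟨hq, hqo, hqt⟩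
  rcases List.mem_cons.mp hmem with rfl | hmem'
  · exact hacyc q (hreach q hmem) (Relation.TransGen.single hedge)
  · have hq_t₀ : pvRT fh top q t₀ := (List.pairwise_cons.mp hpair).1 q hmem'
    have ht₀ : t₀ ≠ "owl:Thing" ∧ ¬(top ≠ [] ∧ t₀ ∈ top) := by
      apply hdrop
      cases ts' with
      | nil => exact absurd hmem' (List.not_mem_nil)
      | cons x l => simp [List.dropLast_cons₂]
    exact hacyc q (hreach q hmem)
      (Relation.TransGen.tail (pvRT_transGen hq_t₀ ht₀.2) hedge)

-- once all parents of t₀ are processed, t₀'s collection is complete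
lemma pvCompleteTop {fh : List (String × List String)} {top : List String} {root : String}
    (hacyc : ∀ c, (c = root ∨ Relation.TransGen (pvTEdge fh top) root c) →
      ¬ Relation.TransGen (pvTEdge fh top) c c)
    {t₀ : String} {ts' : List String} {vis res : PySem.Set String}
    (hpair : (t₀ :: ts').Pairwise (fun a b => pvRT fh top b a))
    (hdrop : ∀ t ∈ (t₀ :: ts').dropLast, t ≠ "owl:Thing" ∧ ¬(top ≠ [] ∧ t ∈ top))
    (hreach : ∀ t ∈ (t₀ :: ts'), t = root ∨ Relation.TransGen (pvTEdge fh top) root t)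
    (hvis : ∀ e ∈ vis, e ∉ (t₀ :: ts') → pvComplete fh top res e)
    (hproc : ∀ p ∈ pvParents fh t₀, p ≠ "owl:Thing" →
      p ∈ res ∧ (¬(top ≠ [] ∧ p ∈ top) → p ∈ vis)) :
    pvComplete fh top res t₀ := by
  intro d hd
  cases hd with
  | base hp ho => exact (hproc d hp ho).1
  | @head _ q _ hp ho hnt hrt =>
    have hq_not : q ∉ (t₀ :: ts') := pvParentNotOnPath hacyc hpair hdrop hreach hp ho hnt
    have hqvis : q ∈ vis := (hproc q hp ho).2 hnt
    exact hvis q hqvis hq_not d hrt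

-- main simulation: under the path invariants the stack machine computes A's continuation
lemma pvSim (fh : List (String × List String)) (top : List String) (root : String)
    (hacyc : ∀ c, (c = root ∨ Relation.TransGen (pvTEdge fh top) root c) →
      ¬ Relation.TransGen (pvTEdge fh top) c c) :
    ∀ (stack : List (List String)) (vis res : PySem.Set String) (f : Nat) (ts : List String),
    ts.length = stack.length →
    List.Forall₂ (pvFrameInv fh top vis res) stack ts →
    ts.Pairwise (fun a b => pvRT fh top b a) →
    (∀ t ∈ ts.dropLast, t ≠ "owl:Thing" ∧ ¬(top ≠ [] ∧ t ∈ top)) →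
    (∀ t ∈ ts.tail, t ∈ fh.map Prod.fst) →
    ts.Nodup →
    (∀ t ∈ ts, t = root ∨ Relation.TransGen (pvTEdge fh top) root t) →
    (∀ t ∈ ts, t ∈ vis) →
    (∀ e ∈ vis, e ∉ ts → pvComplete fh top res e) →
    fh.length + 1 ≤ f + ts.length →
    ghcBStep fh top stack vis res = pvContA fh top f stack res := by
  intro stack vis res
  induction stack, vis, res using ghcBStep.induct (fh := fh) (top := top) with
  | case1 vis res =>
    intro f ts h0 _ _ _ _ _ _ _ _ _
    simp only [ghcBStep, pvContA]
  | case2 rest vis res ih =>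
    intro f ts h0 hF2 hpair hdrop hkeys hnodup hreach htsvis hvis hfuel
    obtain ⟨t₀, ts', rfl⟩ : ∃ a l, ts = a :: l := by
      cases ts with
      | nil => simp at h0
      | cons a l => exact ⟨a, l, rfl⟩
    obtain ⟨hhead, htail⟩ := List.forall₂_cons.mp hF2
    obtain ⟨proc, heq, hall⟩ := hhead
    rw [List.append_nil] at heq
    have hcompl : pvComplete fh top res t₀ :=
      pvCompleteTop hacyc hpair hdrop hreach hvis
        (fun p hp ho => hall p (heq ▸ hp) ho)
    have step : ghcBStep fh top ([] :: rest) vis res = ghcBStep fh top rest vis res := by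
      simp only [ghcBStep]
    rw [step, ih (f+1) ts'
      (by simpa using h0)
      htail
      (List.pairwise_cons.mp hpair).2
      (by
        intro t ht
        apply hdrop
        cases ts' with
        | nil => simp at ht
        | cons x l => rw [List.dropLast_cons₂]; exact List.mem_cons_of_mem _ ht)
      (fun t ht => hkeys t (List.mem_of_mem_tail ht))
      (List.Nodup.of_cons hnodup)
      (fun t ht => hreach t (List.mem_cons_of_mem _ ht))
      (fun t ht => htsvis t (List.mem_cons_of_mem _ ht))
      (by
        intro e he hne
        by_cases het : e = t₀
        · subst het; exact hcompl
        · exact hvis e he (by simp [het, hne]))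
      (by simp at hfuel ⊢; omega)]
    simp only [pvContA, ghcALoop]
  | case3 ps rest vis res ih =>
    intro f ts h0 hF2 hpair hdrop hkeys hnodup hreach htsvis hvis hfuel
    obtain ⟨t₀, ts', rfl⟩ : ∃ a l, ts = a :: l := by
      cases ts with
      | nil => simp at h0
      | cons a l => exact ⟨a, l, rfl⟩
    obtain ⟨hhead, htail⟩ := List.forall₂_cons.mp hF2
    obtain ⟨proc, heq, hall⟩ := hhead
    have hhead' : pvFrameInv fh top vis res ps t₀ := by
      refine ⟨proc ++ ["owl:Thing"], by simpa using heq, ?_⟩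
      intro q hq hqo
      rcases List.mem_append.mp hq with h | h
      · exact hall q h hqo
      · simp at h; exact absurd h hqo
    have step : ghcBStep fh top (("owl:Thing" :: ps) :: rest) vis res
        = ghcBStep fh top (ps :: rest) vis res := by
      simp only [ghcBStep, reduceIte]
    rw [step, ih f (t₀ :: ts') h0 (List.Forall₂.cons hhead' htail) hpair hdrop hkeys hnodup
      hreach htsvis hvis (by simpa using hfuel)]
    simp only [pvContA, ghcALoop, reduceIte]
  | case4 p ps rest vis res ho res' htop ih =>
    intro f ts h0 hF2 hpair hdrop hkeys hnodup hreach htsvis hvis hfuel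
    obtain ⟨t₀, ts', rfl⟩ : ∃ a l, ts = a :: l := by
      cases ts with
      | nil => simp at h0
      | cons a l => exact ⟨a, l, rfl⟩
    obtain ⟨hhead, htail⟩ := List.forall₂_cons.mp hF2
    obtain ⟨proc, heq, hall⟩ := hhead
    have hhead' : pvFrameInv fh top vis (PySem.Set.add res p) ps t₀ := by
      refine ⟨proc ++ [p], by simp [heq], ?_⟩
      intro q hq hqo
      rcases List.mem_append.mp hq with h | h
      · have := hall q h hqo
        exact ⟨pvSetSubsetAdd this.1, this.2⟩
      · simp only [List.mem_singleton] at h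
        subst h
        exact ⟨(PySem.Set.mem_add _ _ _).mpr (Or.inr rfl), fun hc => absurd htop hc⟩
    have step : ghcBStep fh top ((p :: ps) :: rest) vis res
        = ghcBStep fh top (ps :: rest) vis (PySem.Set.add res p) := by
      simp only [ghcBStep, if_neg ho, if_pos htop]
    rw [step, ih f (t₀ :: ts') h0
      (List.Forall₂.cons hhead' (htail.imp (fun _ _ h => pvFrameInvMono pvSetSubsetAdd (fun x hx => hx) h)))
      hpair hdrop hkeys hnodup hreach htsvis
      (fun e he hne => pvCompleteMono pvSetSubsetAdd (hvis e he hne))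
      (by simpa using hfuel)]
    simp only [pvContA, ghcALoop, if_neg ho, if_pos htop]
    rfl
  | case5 p ps rest vis res ho res' htop hpv ih =>
    intro f ts h0 hF2 hpair hdrop hkeys hnodup hreach htsvis hvis hfuel
    obtain ⟨t₀, ts', rfl⟩ : ∃ a l, ts = a :: l := by
      cases ts with
      | nil => simp at h0
      | cons a l => exact ⟨a, l, rfl⟩
    obtain ⟨hhead, htail⟩ := List.forall₂_cons.mp hF2
    obtain ⟨proc, heq, hall⟩ := hhead
    have hp : p ∈ pvParents fh t₀ := by rw [heq]; simp
    have hnotts : p ∉ (t₀ :: ts') := pvParentNotOnPath hacyc hpair hdrop hreach hp ho htop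
    have hcomp : pvComplete fh top res p := hvis p hpv hnotts
    have hr : ghcA fh top f p (PySem.Set.add res p) = PySem.Set.add res p :=
      pvIdem fh top f p _ (pvCompleteMono pvSetSubsetAdd hcomp)
    have hhead' : pvFrameInv fh top vis (PySem.Set.add res p) ps t₀ := by
      refine ⟨proc ++ [p], by simp [heq], ?_⟩
      intro q hq hqo
      rcases List.mem_append.mp hq with h | h
      · have := hall q h hqo
        exact ⟨pvSetSubsetAdd this.1, this.2⟩
      · simp only [List.mem_singleton] at h
        subst h
        exact ⟨(PySem.Set.mem_add _ _ _).mpr (Or.inr rfl), fun _ => hpv⟩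
    have step : ghcBStep fh top ((p :: ps) :: rest) vis res
        = ghcBStep fh top (ps :: rest) vis (PySem.Set.add res p) := by
      simp only [ghcBStep, if_neg ho, if_neg htop, if_pos hpv]
    rw [step, ih f (t₀ :: ts') h0
      (List.Forall₂.cons hhead' (htail.imp (fun _ _ h => pvFrameInvMono pvSetSubsetAdd (fun x hx => hx) h)))
      hpair hdrop hkeys hnodup hreach htsvis
      (fun e he hne => pvCompleteMono pvSetSubsetAdd (hvis e he hne))
      (by simpa using hfuel)]
    simp only [pvContA, ghcALoop, if_neg ho, if_neg htop, hr,
      pvUpdateOfMem (fun x hx => hx)]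
    rfl
  | case6 p ps rest vis res ho res' htop hpv ih =>
    intro f ts h0 hF2 hpair hdrop hkeys hnodup hreach htsvis hvis hfuel
    obtain ⟨t₀, ts', rfl⟩ : ∃ a l, ts = a :: l := by
      cases ts with
      | nil => simp at h0
      | cons a l => exact ⟨a, l, rfl⟩
    obtain ⟨hhead, htail⟩ := List.forall₂_cons.mp hF2
    obtain ⟨proc, heq, hall⟩ := hhead
    have hp : p ∈ pvParents fh t₀ := by rw [heq]; simp
    have hedge : pvTEdge fh top t₀ p := ⟨hp, ho, htop⟩
    have hnotts : p ∉ (t₀ :: ts') := fun h => hpv (htsvis p h)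
    have ht₀keys : t₀ ∈ fh.map Prod.fst := pvMemParentsKeys hp
    have hlen : (t₀ :: ts').length ≤ fh.length := by
      have := pvNodupLen hnodup (by
        intro x hx
        rcases List.mem_cons.mp hx with rfl | hx'
        · exact ht₀keys
        · exact hkeys x hx')
      simpa using this
    obtain ⟨g, rfl⟩ : ∃ g, f = g + 1 := by
      refine ⟨f - 1, ?_⟩
      simp only [List.length_cons] at hfuel hlen
      omega
    have ht₀cond : ts' ≠ [] → t₀ ≠ "owl:Thing" ∧ ¬(top ≠ [] ∧ t₀ ∈ top) := by
      intro hne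
      apply hdrop
      cases ts' with
      | nil => exact absurd rfl hne
      | cons x l => rw [List.dropLast_cons₂]; simp
    have hreachp : p = root ∨ Relation.TransGen (pvTEdge fh top) root p := by
      rcases hreach t₀ (by simp) with rfl | h
      · exact Or.inr (Relation.TransGen.single hedge)
      · exact Or.inr (Relation.TransGen.tail h hedge)
    have hhead' : pvFrameInv fh top (PySem.Set.add vis p) (PySem.Set.add res p) ps t₀ := by
      refine ⟨proc ++ [p], by simp [heq], ?_⟩
      intro q hq hqo
      rcases List.mem_append.mp hq with h | h
      · have := hall q h hqo
        exact ⟨pvSetSubsetAdd this.1, fun ht => pvSetSubsetAdd (this.2 ht)⟩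
      · simp only [List.mem_singleton] at h
        subst h
        exact ⟨(PySem.Set.mem_add _ _ _).mpr (Or.inr rfl),
          fun _ => (PySem.Set.mem_add _ _ _).mpr (Or.inr rfl)⟩
    have step : ghcBStep fh top ((p :: ps) :: rest) vis res
        = ghcBStep fh top (pvParents fh p :: ps :: rest) (PySem.Set.add vis p)
            (PySem.Set.add res p) := by
      simp only [ghcBStep, if_neg ho, if_neg htop, if_neg hpv]
    rw [step, ih g (p :: t₀ :: ts')
      (by simpa using h0)
      (List.Forall₂.cons ⟨[], by simp, by simp⟩
        (List.Forall₂.cons hhead'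
          (htail.imp (fun _ _ h => pvFrameInvMono pvSetSubsetAdd pvSetSubsetAdd h))))
      (by
        rw [List.pairwise_cons]
        refine ⟨?_, hpair⟩
        intro b hb
        rcases List.mem_cons.mp hb with rfl | hb'
        · exact pvRT.base hp ho
        · exact pvRTextend ((List.pairwise_cons.mp hpair).1 b hb')
            (ht₀cond (List.ne_nil_of_mem hb')).2 hp ho)
      (by
        intro t ht
        rw [List.dropLast_cons₂] at ht
        rcases List.mem_cons.mp ht with rfl | ht'
        · exact ⟨ho, htop⟩
        · exact hdrop t ht')
      (by
        intro t ht
        rcases List.mem_cons.mp ht with rfl | ht'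
        · exact ht₀keys
        · exact hkeys t ht')
      (List.nodup_cons.mpr ⟨hnotts, hnodup⟩)
      (by
        intro t ht
        rcases List.mem_cons.mp ht with rfl | ht'
        · exact hreachp
        · exact hreach t ht')
      (by
        intro t ht
        rcases List.mem_cons.mp ht with rfl | ht'
        · exact (PySem.Set.mem_add _ _ _).mpr (Or.inr rfl)
        · exact pvSetSubsetAdd (htsvis t ht'))
      (by
        intro e he hne
        rcases (PySem.Set.mem_add _ _ _).mp he with he' | rfl
        · exact pvCompleteMono pvSetSubsetAdd
            (hvis e he' (fun h => hne (List.mem_cons_of_mem _ h)))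
        · exact absurd (List.mem_cons_self) hne)
      (by simp only [List.length_cons] at hfuel ⊢; omega)]
    simp only [pvContA, ghcALoop, ghcA, if_neg ho, if_neg htop,
      pvUpdateOfMem (fun x hx => hx)]
    rfl

-- ===== VERDICT (by name: the statement is the Claim_ definition above) =====
theorem get_hierarchy_capped_spec : Claim_equal_get_hierarchy_capped := by
  intro fh top tid cap _hdom hpre
  have aux : ∀ init : PySem.Set String,
      ghcA fh top (fh.length + 1) tid init =
        ghcBStep fh top [pvParents fh tid] (PySem.Set.ofList [tid]) init := by
    intro init
    have h := pvSim fh top tid (pvPreAcyc hpre)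
      [pvParents fh tid] (PySem.Set.ofList [tid]) init fh.length [tid]
      (by simp)
      (List.Forall₂.cons ⟨[], by simp, by simp⟩ List.Forall₂.nil)
      (by simp)
      (by simp)
      (by simp)
      (by simp)
      (by intro t ht; simp at ht; exact Or.inl ht)
      (by intro t ht; simp at ht; subst ht; rw [PySem.Set.mem_ofList]; simp)
      (by
        intro e he hne
        rw [PySem.Set.mem_ofList] at he
        simp at he hne
        exact absurd he hne)
      (by simp)
    rw [h]
    simp only [pvContA, ghcA]
  unfold Spec_get_hierarchy_capped get_hierarchy_capped get_hierarchy_capped_alt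
  cases cap with
  | none => exact aux PySem.Set.empty
  | some l =>
    by_cases hl : l = [] <;> simp only [hl, reduceIte] <;>
      first
        | exact aux PySem.Set.empty
        | exact aux (PySem.Set.ofList l)
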